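-- pv_equiv track=rewrite | github.com/pypi-data/pypi-mirror-371 | packages/python-bdtool/python_bdtool-0.0.1004-py3-none-any.whl/bdtool/string.py | first_nested_blocks
-- ===== SOURCE A (Python) =====
-- def first_nested_blocks(text, delimiters: str = "{}") -> list[tuple]:
--     if not isinstance(delimiters, str) or len(delimiters) != 2 or delimiters[0] == delimiters[1]:
--         raise ValueError("Delimiter tuple must have exactly two different char.")
--     left, right = delimiters
--     stack = []
--     flag = 1
--     literal_text, field= ([], [])
--     for char in text:
--         if char == left:
--             if not stack:  # 栈为空时，标记新嵌套块的开始
--                 flag = 2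
--             else:
--                 field.append(char)
--             stack.append(char)  # 入栈，增加层级
--         elif char == right:
--             if stack:  # 栈不为空时，出栈减少层级
--                 stack.pop()
--                 if not stack:  # 栈为空时，说明当前嵌套块结束
--                     break
--                 else:
--                     field.append(char)
--         elif flag == 1:
--             literal_text.append(char)
--         elif flag == 2:
--             field.append(char)
--     if stack:
--         raise ValueError("The block is not closed.")
--
--     return ("".join(literal_text), "".join(field))
-- ===== SOURCE B (Python) =====
-- def first_nested_blocks(text, delimiters: str = "{}") -> list[tuple]:
--     if not isinstance(delimiters, str) or len(delimiters) != 2 or delimiters[0] == delimiters[1]: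
--         raise ValueError("Delimiter tuple must have exactly two different char.")
--     left, right = delimiters
--     # one locating pass: index of the first top-level left, and of its matching right
--     open_i = close_i = None
--     depth = 0
--     for j, c in enumerate(text):
--         if c == left:
--             if depth == 0:
--                 open_i = j
--             depth += 1
--         elif c == right and depth > 0:
--             depth -= 1
--             if depth == 0:
--                 close_i = j
--                 break
--     if open_i is None:
--         return ("".join(c for c in text if c != right), "")
--     if close_i is None:
--         raise ValueError("The block is not closed.")
--     return ("".join(c for c in text[:open_i] if c != right), text[open_i + 1:close_i])
-- ===== Notes on version B (the rewrite author's own statement) =====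
-- stated objective: alternative
-- what changed: Instead of A's single state-machine pass that appends characters into literal/field accumulators, B does one locating pass with a depth counter that only computes the open/close indices of the first top-level block, then builds the results by slicing (verbatim field slice, right-filtered prefix).
import Mathlib
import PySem

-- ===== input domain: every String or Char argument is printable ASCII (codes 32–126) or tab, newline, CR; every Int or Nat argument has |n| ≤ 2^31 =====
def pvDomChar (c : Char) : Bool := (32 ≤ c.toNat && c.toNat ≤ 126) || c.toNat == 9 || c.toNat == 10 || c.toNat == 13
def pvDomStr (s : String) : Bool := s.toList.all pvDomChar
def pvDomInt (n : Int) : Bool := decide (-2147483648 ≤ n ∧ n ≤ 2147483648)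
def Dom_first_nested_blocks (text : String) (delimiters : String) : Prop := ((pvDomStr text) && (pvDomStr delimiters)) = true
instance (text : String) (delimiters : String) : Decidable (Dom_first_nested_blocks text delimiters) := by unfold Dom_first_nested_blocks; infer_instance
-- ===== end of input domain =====

-- B replaces A's accumulate-as-you-go state machine by a locating pass (indices only) plus slicing; same O(n) cost (objective: alternative).
-- Both Pythons raise ValueError on bad delimiters or an unclosed block; those inputs are outside Pre_ and both ports return ("","") there.

-- ===== PORT A =====
-- A's for-loop with state (stack, flag, literal_text, field); the list accumulators
-- are built head-first (Python appends) and reversed at join time.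
def pvLoopA (l r : Char) : List Char → List Char → Nat → List Char → List Char →
    List Char × List Char × List Char
  | [], stack, _flag, lit, fld => (stack, lit, fld)
  | c :: cs, stack, flag, lit, fld =>
    if c = l then
      if stack.isEmpty then pvLoopA l r cs (c :: stack) 2 lit fld
      else pvLoopA l r cs (c :: stack) flag lit (c :: fld)
    else if c = r then
      if stack.isEmpty then pvLoopA l r cs stack flag lit fld
      else if stack.tail.isEmpty then ([], lit, fld)   -- Python's break
      else pvLoopA l r cs stack.tail flag lit (c :: fld)
    else if flag = 1 then pvLoopA l r cs stack flag (c :: lit) fld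
    else if flag = 2 then pvLoopA l r cs stack flag lit (c :: fld)
    else pvLoopA l r cs stack flag lit fld

def first_nested_blocks (text : String) (delimiters : String) : String × String :=
  match delimiters.toList with
  | [l, r] =>
    if l = r then ("", "")                    -- raise ValueError (outside Pre_)
    else
      match pvLoopA l r text.toList [] 1 [] [] with
      | (stack, lit, fld) =>
        if stack.isEmpty then (String.ofList lit.reverse, String.ofList fld.reverse)
        else ("", "")                          -- raise ValueError (outside Pre_)
  | _ => ("", "")                              -- raise ValueError (outside Pre_)

-- ===== PORT B =====
-- B's locating pass: returns (open index of first top-level `l`, index of its matching `r`).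
def pvLocateB (l r : Char) : List Char → Nat → Nat → Option Nat → Option Nat × Option Nat
  | [], _, _, openi => (openi, none)
  | c :: cs, j, depth, openi =>
    if c = l then
      pvLocateB l r cs (j + 1) (depth + 1) (if depth = 0 then some j else openi)
    else if c = r ∧ 0 < depth then
      if depth = 1 then (openi, some j)        -- Python's break
      else pvLocateB l r cs (j + 1) (depth - 1) openi
    else pvLocateB l r cs (j + 1) depth openi

def first_nested_blocks_alt (text : String) (delimiters : String) : String × String :=
  if delimiters.toList.length = 2 then
    let l := delimiters.toList[0]!
    let r := delimiters.toList[1]!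
    if l = r then ("", "")                     -- raise ValueError (outside Pre_)
    else
      match pvLocateB l r text.toList 0 0 none with
      | (none, _) => (String.ofList (text.toList.filter (· ≠ r)), "")
      | (some _, none) => ("", "")             -- raise ValueError (outside Pre_)
      | (some o, some c) =>
        (String.ofList ((text.toList.take o).filter (· ≠ r)),
         String.ofList (PySem.List.slice text.toList (some ((o + 1 : Nat) : Int)) (some ((c : Nat) : Int))))
  else ("", "")                                -- raise ValueError (outside Pre_)

-- ===== PRECONDITION & SPEC =====
-- Pre_ excludes exactly the inputs on which Python A raises ValueError: delimiters that are not
-- two distinct characters, and texts whose first left delimiter is never matched (the count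
-- condition below says the running left/right balance after the first left returns to zero).
def Pre_first_nested_blocks (text : String) (delimiters : String) : Prop :=
  delimiters.toList.length = 2 ∧
  delimiters.toList[0]! ≠ delimiters.toList[1]! ∧
  (delimiters.toList[0]! ∈ text.toList →
    ∃ j < text.toList.length + 1,
      text.toList.findIdx (· = delimiters.toList[0]!) < j ∧
      ((text.toList.take j).drop (text.toList.findIdx (· = delimiters.toList[0]!))).count delimiters.toList[0]! =
      ((text.toList.take j).drop (text.toList.findIdx (· = delimiters.toList[0]!))).count delimiters.toList[1]!)
instance (text : String) (delimiters : String) : Decidable (Pre_first_nested_blocks text delimiters) := by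
  unfold Pre_first_nested_blocks; infer_instance

def pvWitness_first_nested_blocks : String × String := ("ab)c(d(e)f)g", "()")

def Spec_first_nested_blocks (text : String) (delimiters : String) (out : String × String) : Prop := out = first_nested_blocks_alt text delimiters
instance (text : String) (delimiters : String) (out : String × String) : Decidable (Spec_first_nested_blocks text delimiters out) := by unfold Spec_first_nested_blocks; infer_instance

-- ===== CLAIM (what is proved, stated in full; the proofs are below) =====
def Claim_equal_first_nested_blocks : Prop := ∀ (text : String) (delimiters : String), Dom_first_nested_blocks text delimiters → Pre_first_nested_blocks text delimiters → Spec_first_nested_blocks text delimiters (first_nested_blocks text delimiters)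

-- ===== LEMMAS AND PROOFS =====

-- Common yardstick: relative index (within the suffix after the opening `l`) of the
-- position where the depth counter first returns to zero.
def pvScan (l r : Char) : List Char → Nat → Option Nat
  | [], _ => none
  | c :: cs, d =>
    if c = l then (pvScan l r cs (d + 1)).map (· + 1)
    else if c = r then (if d = 1 then some 0 else (pvScan l r cs (d - 1)).map (· + 1))
    else (pvScan l r cs d).map (· + 1)

theorem pvLoopA_phase2_some (l r : Char) (cs : List Char) : ∀ (stack lit fld : List Char) (k : Nat),
    stack ≠ [] → pvScan l r cs stack.length = some k →
    pvLoopA l r cs stack 2 lit fld = ([], lit, (cs.take k).reverse ++ fld) := by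
  induction cs with
  | nil => intro stack lit fld k hs h; simp [pvScan] at h
  | cons c cs ih =>
    intro stack lit fld k hs h
    obtain ⟨s0, ss, rfl⟩ : ∃ s0 ss, stack = s0 :: ss := by
      cases stack with | nil => exact absurd rfl hs | cons a b => exact ⟨a, b, rfl⟩
    by_cases hcl : c = l
    · simp only [pvScan, if_pos hcl] at h
      obtain ⟨k', hk', rfl⟩ := Option.map_eq_some_iff.mp h
      have step : pvLoopA l r (c :: cs) (s0 :: ss) 2 lit fld
          = pvLoopA l r cs (c :: s0 :: ss) 2 lit (c :: fld) := by
        simp only [pvLoopA, if_pos hcl, List.isEmpty_cons, Bool.false_eq_true, if_false]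
      rw [step, ih (c :: s0 :: ss) lit (c :: fld) k' (by simp) (by simpa using hk')]
      simp
    · by_cases hcr : c = r
      · simp only [pvScan, if_neg hcl, if_pos hcr] at h
        cases ss with
        | nil =>
          simp only [List.length_cons, List.length_nil] at h
          obtain rfl : (0 : Nat) = k := by simpa using h
          simp only [pvLoopA, if_neg hcl, if_pos hcr, List.isEmpty_cons, Bool.false_eq_true,
            if_false, List.tail_cons, List.isEmpty_nil, if_true, List.take_zero, List.reverse_nil,
            List.nil_append]
        | cons b bs =>
          have hne : (s0 :: b :: bs).length ≠ 1 := by simp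
          rw [if_neg hne] at h
          obtain ⟨k', hk', rfl⟩ := Option.map_eq_some_iff.mp h
          have step : pvLoopA l r (c :: cs) (s0 :: b :: bs) 2 lit fld
              = pvLoopA l r cs (b :: bs) 2 lit (c :: fld) := by
            simp only [pvLoopA, if_neg hcl, if_pos hcr, List.isEmpty_cons, Bool.false_eq_true,
              if_false, List.tail_cons]
          rw [step, ih (b :: bs) lit (c :: fld) k' (by simp) (by simpa using hk')]
          simp
      · simp only [pvScan, if_neg hcl, if_neg hcr] at h
        obtain ⟨k', hk', rfl⟩ := Option.map_eq_some_iff.mp h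
        have step : pvLoopA l r (c :: cs) (s0 :: ss) 2 lit fld
            = pvLoopA l r cs (s0 :: ss) 2 lit (c :: fld) := by
          simp only [pvLoopA, if_neg hcl, if_neg hcr]
          norm_num
        rw [step, ih (s0 :: ss) lit (c :: fld) k' (by simp) hk']
        simp

theorem pvLoopA_phase2_none (l r : Char) (cs : List Char) : ∀ (stack lit fld : List Char),
    stack ≠ [] → pvScan l r cs stack.length = none →
    (pvLoopA l r cs stack 2 lit fld).1 ≠ [] := by
  induction cs with
  | nil => intro stack lit fld hs h; simpa [pvLoopA] using hs
  | cons c cs ih =>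
    intro stack lit fld hs h
    obtain ⟨s0, ss, rfl⟩ : ∃ s0 ss, stack = s0 :: ss := by
      cases stack with | nil => exact absurd rfl hs | cons a b => exact ⟨a, b, rfl⟩
    by_cases hcl : c = l
    · simp only [pvScan, if_pos hcl, Option.map_eq_none_iff] at h
      have step : pvLoopA l r (c :: cs) (s0 :: ss) 2 lit fld
          = pvLoopA l r cs (c :: s0 :: ss) 2 lit (c :: fld) := by
        simp only [pvLoopA, if_pos hcl, List.isEmpty_cons, Bool.false_eq_true, if_false]
      rw [step]
      exact ih (c :: s0 :: ss) lit (c :: fld) (by simp) (by simpa using h)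
    · by_cases hcr : c = r
      · simp only [pvScan, if_neg hcl, if_pos hcr] at h
        cases ss with
        | nil => simp at h
        | cons b bs =>
          have hne : (s0 :: b :: bs).length ≠ 1 := by simp
          rw [if_neg hne, Option.map_eq_none_iff] at h
          have step : pvLoopA l r (c :: cs) (s0 :: b :: bs) 2 lit fld
              = pvLoopA l r cs (b :: bs) 2 lit (c :: fld) := by
            simp only [pvLoopA, if_neg hcl, if_pos hcr, List.isEmpty_cons, Bool.false_eq_true,
              if_false, List.tail_cons]
          rw [step]
          exact ih (b :: bs) lit (c :: fld) (by simp) (by simpa using h)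
      · simp only [pvScan, if_neg hcl, if_neg hcr, Option.map_eq_none_iff] at h
        have step : pvLoopA l r (c :: cs) (s0 :: ss) 2 lit fld
            = pvLoopA l r cs (s0 :: ss) 2 lit (c :: fld) := by
          simp only [pvLoopA, if_neg hcl, if_neg hcr]
          norm_num
        rw [step]
        exact ih (s0 :: ss) lit (c :: fld) (by simp) h

theorem pvLoopA_phase1 (l r : Char) (hlr : l ≠ r) (cs : List Char) : ∀ (lit : List Char),
    pvLoopA l r cs [] 1 lit [] =
      match cs.findIdx? (· = l) with
      | none => ([], (cs.filter (· ≠ r)).reverse ++ lit, [])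
      | some i => pvLoopA l r (cs.drop (i + 1)) [l] 2 (((cs.take i).filter (· ≠ r)).reverse ++ lit) [] := by
  induction cs with
  | nil => intro lit; simp [pvLoopA, List.findIdx?_nil]
  | cons c cs ih =>
    intro lit
    by_cases hcl : c = l
    · have step : pvLoopA l r (c :: cs) [] 1 lit [] = pvLoopA l r cs [c] 2 lit [] := by
        simp [pvLoopA, hcl]
      rw [step, List.findIdx?_cons, if_pos (by simp [hcl])]
      simp [hcl]
    · by_cases hcr : c = r
      · have hrl : ¬ r = l := fun h => hlr h.symm
        have step : pvLoopA l r (c :: cs) [] 1 lit [] = pvLoopA l r cs [] 1 lit [] := by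
          simp [pvLoopA, hcr, hrl]
        rw [step, ih lit, List.findIdx?_cons, if_neg (by simp [hcl])]
        cases hfi : cs.findIdx? (· = l) with
        | none => simp [hcr]
        | some i => simp [hcr]
      · have step : pvLoopA l r (c :: cs) [] 1 lit [] = pvLoopA l r cs [] 1 (c :: lit) [] := by
          simp [pvLoopA, hcl, hcr]
        rw [step, ih (c :: lit), List.findIdx?_cons, if_neg (by simp [hcl])]
        cases hfi : cs.findIdx? (· = l) with
        | none => simp [hcr]
        | some i => simp [hcr]

theorem pvLocateB_phase2 (l r : Char) (cs : List Char) : ∀ (j d : Nat) (oi : Nat),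
    1 ≤ d →
    pvLocateB l r cs j d (some oi) = (some oi, (pvScan l r cs d).map (j + ·)) := by
  induction cs with
  | nil => intro j d oi hd; simp [pvLocateB, pvScan]
  | cons c cs ih =>
    intro j d oi hd
    by_cases hcl : c = l
    · simp only [pvLocateB, if_pos hcl, if_neg (by omega : ¬d = 0)]
      rw [ih (j + 1) (d + 1) oi (by omega)]
      simp only [pvScan, if_pos hcl]
      congr 1
      rw [Option.map_map]
      congr 1; funext k; simp; omega
    · by_cases hcr : c = r
      · have hcond : (c = r ∧ 0 < d) := ⟨hcr, by omega⟩
        simp only [pvLocateB, if_neg hcl, if_pos hcond]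
        by_cases hd1 : d = 1
        · subst hd1; simp [pvScan, if_neg hcl, if_pos hcr]
        · rw [if_neg hd1, ih (j + 1) (d - 1) oi (by omega)]
          simp only [pvScan, if_neg hcl, if_pos hcr, if_neg hd1]
          congr 1
          rw [Option.map_map]
          congr 1; funext k; simp; omega
      · have hcond : ¬(c = r ∧ 0 < d) := by intro hh; exact hcr hh.1
        simp only [pvLocateB, if_neg hcl, if_neg hcond]
        rw [ih (j + 1) d oi hd]
        simp only [pvScan, if_neg hcl, if_neg hcr]
        congr 1
        rw [Option.map_map]
        congr 1; funext k; simp; omega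

theorem pvLocateB_phase1 (l r : Char) (cs : List Char) : ∀ (j : Nat),
    pvLocateB l r cs j 0 none =
      match cs.findIdx? (· = l) with
      | none => (none, none)
      | some i => (some (j + i), (pvScan l r (cs.drop (i + 1)) 1).map (fun k => j + i + 1 + k)) := by
  induction cs with
  | nil => intro j; simp [pvLocateB, List.findIdx?_nil]
  | cons c cs ih =>
    intro j
    by_cases hcl : c = l
    · have step : pvLocateB l r (c :: cs) j 0 none = pvLocateB l r cs (j + 1) 1 (some j) := by
        simp [pvLocateB, hcl]
      rw [step, pvLocateB_phase2 l r cs (j + 1) 1 j (le_refl 1)]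
      rw [List.findIdx?_cons, if_pos (by simp [hcl])]
      simp only [List.drop_succ_cons, List.drop_zero]
      congr 1
    · have hcond : ¬(c = r ∧ (0 : Nat) > 0) := by omega
      have step : pvLocateB l r (c :: cs) j 0 none = pvLocateB l r cs (j + 1) 0 none := by
        by_cases hcr : c = r
        · simp [pvLocateB, if_neg hcl, hcond]
        · simp [pvLocateB, hcl, hcr]
      rw [step, ih (j + 1)]
      rw [List.findIdx?_cons, if_neg (by simp [hcl])]
      cases hfi : cs.findIdx? (· = l) with
      | none => simp
      | some i =>
        simp only [Option.map_some, List.drop_succ_cons]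
        congr 1
        · congr 1; omega
        · congr 1; funext k; omega

theorem pvLoopA_phase1_none (l r : Char) (hlr : l ≠ r) (cs : List Char) (lit : List Char)
    (h : cs.findIdx? (· = l) = none) :
    pvLoopA l r cs [] 1 lit [] = ([], (cs.filter (· ≠ r)).reverse ++ lit, []) := by
  have h0 := pvLoopA_phase1 l r hlr cs lit
  rw [h] at h0
  exact h0

theorem pvLoopA_phase1_some (l r : Char) (hlr : l ≠ r) (cs : List Char) (lit : List Char) (i : Nat)
    (h : cs.findIdx? (· = l) = some i) :
    pvLoopA l r cs [] 1 lit [] =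
      pvLoopA l r (cs.drop (i + 1)) [l] 2 (((cs.take i).filter (· ≠ r)).reverse ++ lit) [] := by
  have h0 := pvLoopA_phase1 l r hlr cs lit
  rw [h] at h0
  exact h0

theorem pvLocateB_phase1_none (l r : Char) (cs : List Char)
    (h : cs.findIdx? (· = l) = none) :
    pvLocateB l r cs 0 0 none = (none, none) := by
  have h0 := pvLocateB_phase1 l r cs 0
  rw [h] at h0
  exact h0

theorem pvLocateB_phase1_some (l r : Char) (cs : List Char) (i : Nat)
    (h : cs.findIdx? (· = l) = some i) :
    pvLocateB l r cs 0 0 none = (some i, (pvScan l r (cs.drop (i + 1)) 1).map (fun k => i + 1 + k)) := by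
  have h0 := pvLocateB_phase1 l r cs 0
  rw [h] at h0
  simpa using h0

theorem first_nested_blocks_spec : Claim_equal_first_nested_blocks := by
  intro text delimiters _dom _pre
  unfold Spec_first_nested_blocks first_nested_blocks first_nested_blocks_alt
  rcases hdl : delimiters.toList with _ | ⟨l, _ | ⟨r, _ | ⟨x, xs⟩⟩⟩
  · simp [hdl]
  · simp [hdl]
  · simp only [hdl, List.length_cons, List.length_nil, List.getElem!_cons_zero,
      List.getElem!_cons_succ, if_pos rfl]
    by_cases hlr : l = r
    · simp [hlr]
    · simp only [if_neg hlr]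
      cases hfi : text.toList.findIdx? (· = l) with
      | none =>
        rw [pvLoopA_phase1_none l r hlr text.toList [] hfi,
          pvLocateB_phase1_none l r text.toList hfi]
        simp
      | some i =>
        rw [pvLoopA_phase1_some l r hlr text.toList [] i hfi,
          pvLocateB_phase1_some l r text.toList i hfi]
        cases hsc : pvScan l r (text.toList.drop (i + 1)) 1 with
        | none =>
          have h1 := pvLoopA_phase2_none l r (text.toList.drop (i + 1)) [l]
            (((text.toList.take i).filter (· ≠ r)).reverse ++ []) [] (by simp)
            (by simpa using hsc)
          rcases hres : pvLoopA l r (text.toList.drop (i + 1)) [l] 2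
              (((text.toList.take i).filter (· ≠ r)).reverse ++ []) [] with ⟨st, lit, fld⟩
          rw [hres] at h1
          simp only [Option.map_none]
          simp [List.isEmpty_iff, h1]
        | some k =>
          rw [pvLoopA_phase2_some l r (text.toList.drop (i + 1)) [l]
              (((text.toList.take i).filter (· ≠ r)).reverse ++ []) [] k (by simp)
              (by simpa using hsc)]
          simp only [Option.map_some]
          have hsl : PySem.List.slice text.toList (some (((i + 1 : Nat) : Int)))
              (some ((i + 1 + k : Nat) : Int))
              = (text.toList.drop (i + 1)).take k := by
            rw [PySem.List.slice_natCast]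
            congr 1
            omega
          simp only [List.isEmpty_nil, if_true]
          refine Prod.ext ?_ ?_
          · simp
          · have := congrArg String.ofList hsl
            simpa using this.symm
  · simp [hdl]
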